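-- pv_equiv track=rewrite | github.com/aditya-kumar23/ResearchProjectFHDO | c-slam/new_eval/tools/plot_eval_chapter_updated.py | _dataset_team_size
-- ===== SOURCE A (Python) =====
-- def _dataset_team_size(dataset_tag: str) -> int:
--     # expects ...-rN-...
--     parts = dataset_tag.split("-r", 1)
--     if len(parts) < 2:
--         return -1
--     rest = parts[1]
--     n = ""
--     for ch in rest:
--         if ch.isdigit():
--             n += ch
--         else:
--             break
--     try:
--         return int(n)
--     except Exception:
--         return -1
-- ===== SOURCE B (Python) =====
-- import re
--
--
-- def _dataset_team_size(dataset_tag: str) -> int: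
--     m = re.search(r"-r(\d*)", dataset_tag)
--     if m is None:
--         return -1
--     try:
--         return int(m.group(1))
--     except Exception:
--         return -1
-- ===== Notes on version B (the rewrite author's own statement) =====
-- stated objective: idiomatic
-- what changed: Replaces the split + manual character-accumulation loop + int() with a single regex search that anchors at the first separator occurrence and greedily captures the contiguous leading digits.
import Mathlib
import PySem

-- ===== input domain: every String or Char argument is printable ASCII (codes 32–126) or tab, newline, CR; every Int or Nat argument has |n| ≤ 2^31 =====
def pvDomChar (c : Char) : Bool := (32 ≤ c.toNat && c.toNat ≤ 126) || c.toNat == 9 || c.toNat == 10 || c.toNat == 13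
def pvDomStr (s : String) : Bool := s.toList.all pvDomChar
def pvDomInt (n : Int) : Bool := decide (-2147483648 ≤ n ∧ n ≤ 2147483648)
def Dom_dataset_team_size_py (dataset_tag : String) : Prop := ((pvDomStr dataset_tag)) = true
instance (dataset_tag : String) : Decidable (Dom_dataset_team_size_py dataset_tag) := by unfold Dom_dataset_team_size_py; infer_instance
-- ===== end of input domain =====

-- B replaces A's split + manual digit-accumulation loop by a single regex-style search
-- ('-r(\d*)': first '-r', then the greedy run of leading digits) — more idiomatic, same cost.


-- ===== PORT A =====
-- the 'for ch in rest: if ch.isdigit(): n += ch else: break' loop, literally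
def pvAScan (cs : List Char) (n : List Char) : List Char :=
  match cs with
  | [] => n
  | c :: rest => if PySem.Chars.isdigit c then pvAScan rest (n ++ [c]) else n

def dataset_team_size_py (dataset_tag : String) : Int :=
  match PySem.Str.splitMax? dataset_tag "-r" 1 with
  | none => -1  -- unreachable: the separator "-r" is non-empty, so split never raises
  | some parts =>
    if parts.length < 2 then -1
    else
      match parts[1]? with
      | none => -1  -- unreachable: length ≥ 2
      | some rest =>
        let n := pvAScan rest.toList []
        match PySem.Int.ofChars? n with
        | some v => v
        | none => -1  -- int('') raises ValueError → except returns -1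

-- ===== PORT B =====
-- re.search(r'-r(\d*)', s): matches at the FIRST occurrence of '-r' (the group may be
-- empty), capturing the greedy run of digits right after it; ported as find + takeWhile.
def dataset_team_size_py_alt (dataset_tag : String) : Int :=
  let i := PySem.Str.find dataset_tag "-r"
  if i = -1 then -1
  else
    let digits := (dataset_tag.toList.drop (i.toNat + 2)).takeWhile PySem.Chars.isdigit
    match PySem.Int.ofChars? digits with
    | some v => v
    | none => -1  -- int('') raises ValueError → except returns -1

-- ===== PRECONDITION & SPEC =====
def Spec_dataset_team_size_py (dataset_tag : String) (out : Int) : Prop := out = dataset_team_size_py_alt dataset_tag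
instance (dataset_tag : String) (out : Int) : Decidable (Spec_dataset_team_size_py dataset_tag out) := by unfold Spec_dataset_team_size_py; infer_instance

-- ===== CLAIM (what is proved, stated in full; the proofs are below) =====
def Claim_equal_dataset_team_size_py : Prop := ∀ (dataset_tag : String), Dom_dataset_team_size_py dataset_tag → Spec_dataset_team_size_py dataset_tag (dataset_team_size_py dataset_tag)

-- ===== LEMMAS AND PROOFS =====

-- proof helper: the suffix of s right after the first occurrence of sep (none if absent)
def pvBFind (sep : List Char) : List Char → Option (List Char)
  | [] => none
  | c :: rest =>
    if sep.isPrefixOf (c :: rest) then some ((c :: rest).drop sep.length)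
    else pvBFind sep rest

theorem pvAScan_eq (cs : List Char) : ∀ n, pvAScan cs n = n ++ cs.takeWhile PySem.Chars.isdigit := by
  induction cs with
  | nil => simp [pvAScan]
  | cons c rest ih =>
    intro n
    simp only [pvAScan, List.takeWhile]
    by_cases h : PySem.Chars.isdigit c <;> simp [h, ih]

theorem pvFindGo_succ (sep : List Char) (hsep : sep ≠ []) (s : List Char) :
    ∀ k : Nat, PySem.Chars.find.go sep s (k + 1) =
      if PySem.Chars.find.go sep s k = -1 then -1 else PySem.Chars.find.go sep s k + 1 := by
  induction s with
  | nil =>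
    intro k
    simp [PySem.Chars.find.go, List.isEmpty_iff, hsep]
  | cons c rest ih =>
    intro k
    by_cases h : sep.isPrefixOf (c :: rest)
    · simp [PySem.Chars.find.go, h]
    · simp only [PySem.Chars.find.go, h, Bool.false_eq_true, if_false]
      exact ih (k + 1)

theorem pvFind_bFind (sep : List Char) (hsep : sep ≠ []) (s : List Char) :
    (PySem.Chars.find s sep = -1 ∧ pvBFind sep s = none) ∨
    (0 ≤ PySem.Chars.find s sep ∧
      pvBFind sep s = some (s.drop ((PySem.Chars.find s sep).toNat + sep.length))) := by
  induction s with
  | nil =>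
    left
    constructor
    · simp [PySem.Chars.find, PySem.Chars.find.go, List.isEmpty_iff, hsep]
    · rfl
  | cons c rest ih =>
    by_cases h : sep.isPrefixOf (c :: rest)
    · right
      constructor
      · simp [PySem.Chars.find, PySem.Chars.find.go, h]
      · simp [PySem.Chars.find, PySem.Chars.find.go, h, pvBFind]
    · have hstep : PySem.Chars.find (c :: rest) sep = PySem.Chars.find.go sep rest 1 := by
        simp [PySem.Chars.find, PySem.Chars.find.go, h]
      have hb : pvBFind sep (c :: rest) = pvBFind sep rest := by
        simp [pvBFind, h]
      have hsucc := pvFindGo_succ sep hsep rest 0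
      have hfind0 : PySem.Chars.find rest sep = PySem.Chars.find.go sep rest 0 := rfl
      rcases ih with ⟨h1, h2⟩ | ⟨h1, h2⟩
      · left
        rw [hstep, hb, h2]
        rw [hfind0] at h1
        simp [hsucc, h1]
      · right
        rw [hfind0] at h1 h2
        have hne : PySem.Chars.find.go sep rest 0 ≠ -1 := by omega
        rw [hstep, hb, hsucc]
        simp only [hne, if_false]
        refine ⟨by omega, ?_⟩
        rw [h2]
        rw [show ((PySem.Chars.find.go sep rest 0 + 1).toNat + sep.length) =
            ((PySem.Chars.find.go sep rest 0).toNat + sep.length) + 1 from by omega]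
        rw [List.drop_succ_cons]

-- splitOnMax.go with maxsplit exhausted returns immediately
theorem pvGo_zero (sep : List Char) (fuel : Nat) (l cur : List Char) (acc : List (List Char)) :
    PySem.Chars.splitOnMax.go sep fuel 0 l cur acc = ((cur.reverse ++ l) :: acc).reverse := by
  cases fuel with
  | zero => simp [PySem.Chars.splitOnMax.go]
  | succ f =>
    cases l with
    | nil => simp [PySem.Chars.splitOnMax.go]
    | cons c rest => simp [PySem.Chars.splitOnMax.go]

theorem pvGo_one (sep : List Char) (s : List Char) :
    ∀ fuel cur, s.length < fuel →
      ∃ p, PySem.Chars.splitOnMax.go sep fuel 1 s cur [] =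
        match pvBFind sep s with
        | none => [p]
        | some r => [p, r] := by
  induction s with
  | nil =>
    intro fuel cur hf
    cases fuel with
    | zero => omega
    | succ f =>
      exact ⟨cur.reverse, by simp [PySem.Chars.splitOnMax.go, pvBFind]⟩
  | cons c rest ih =>
    intro fuel cur hf
    cases fuel with
    | zero => omega
    | succ f =>
      by_cases h : sep.isPrefixOf (c :: rest)
      · refine ⟨cur.reverse, ?_⟩
        simp only [pvBFind, h, if_pos]
        simp [PySem.Chars.splitOnMax.go, h, pvGo_zero]
      · obtain ⟨p, hp⟩ := ih f (c :: cur) (by simp at hf ⊢; omega)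
        refine ⟨p, ?_⟩
        simp only [pvBFind, h, Bool.false_eq_true, if_false]
        simpa [PySem.Chars.splitOnMax.go, h] using hp

-- ===== VERDICT (by name: the statement is the Claim_ definition above) =====
theorem dataset_team_size_py_spec : Claim_equal_dataset_team_size_py := by
  intro s _
  unfold Spec_dataset_team_size_py dataset_team_size_py dataset_team_size_py_alt
  have hsep : ("-r".toList : List Char) ≠ [] := by decide
  have hsplit : PySem.Str.splitMax? s "-r" 1 =
      some ((PySem.Chars.splitOnMax s.toList "-r".toList 1).map String.ofList) := by
    simp [PySem.Str.splitMax?, PySem.Chars.splitMax?]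
  obtain ⟨p, hp⟩ := pvGo_one "-r".toList s.toList (s.toList.length + 1) [] (by omega)
  have hgo : PySem.Chars.splitOnMax s.toList "-r".toList 1 =
      PySem.Chars.splitOnMax.go "-r".toList (s.toList.length + 1) 1 s.toList [] [] := by
    simp [PySem.Chars.splitOnMax]
  have hfind : PySem.Str.find s "-r" = PySem.Chars.find s.toList "-r".toList := rfl
  rcases pvFind_bFind "-r".toList hsep s.toList with ⟨h1, h2⟩ | ⟨h1, h2⟩
  · -- no occurrence: both return -1
    rw [hsplit, hgo, hp, h2, hfind, h1]
    simp
  · -- first occurrence at index i: parts = [p, r] with r = drop (i + 2)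
    rw [hsplit, hgo, hp, h2, hfind]
    have hne : PySem.Chars.find s.toList "-r".toList ≠ -1 := by omega
    simp only [hne, if_false, List.map_cons, List.map_nil]
    have hlen : (("-r".toList : List Char)).length = 2 := by decide
    rw [hlen] at *
    simp [pvAScan_eq]
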